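-- pv_equiv track=rewrite | github.com/ray-bao-mcgill/yt_transcript | transformer_app/bert_word_clustering_analyzer.py | _group_semantically_similar_words
-- ===== SOURCE A (Python) =====
-- from typing import Dict, List, Tuple, Optional
--
-- def _group_semantically_similar_words(words: List[str]) -> Dict:
--     """Group words by semantic similarity"""
--     # Simple semantic grouping based on word patterns
--     groups = {
--         'political': [],
--         'economic': [],
--         'social': [],
--         'technical': [],
--         'emotional': [],
--         'other': []
--     }
--
--     political_terms = ['government', 'politics', 'election', 'vote', 'policy', 'law']
--     economic_terms = ['economy', 'money', 'business', 'market', 'trade', 'tax']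
--     social_terms = ['people', 'society', 'community', 'family', 'education', 'health']
--     technical_terms = ['technology', 'science', 'research', 'data', 'system', 'process']
--     emotional_terms = ['love', 'hate', 'fear', 'hope', 'anger', 'joy']
--
--     for word in words:
--         if word in political_terms:
--             groups['political'].append(word)
--         elif word in economic_terms:
--             groups['economic'].append(word)
--         elif word in social_terms:
--             groups['social'].append(word)
--         elif word in technical_terms:
--             groups['technical'].append(word)
--         elif word in emotional_terms:
--             groups['emotional'].append(word)
--         else:
--             groups['other'].append(word)
--
--     # Remove empty groups
--     return {k: v for k, v in groups.items() if v}
-- ===== SOURCE B (Python) =====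
-- from typing import Dict, List, Tuple, Optional
--
-- _CATEGORIES = [
--     ('political', ['government', 'politics', 'election', 'vote', 'policy', 'law']),
--     ('economic', ['economy', 'money', 'business', 'market', 'trade', 'tax']),
--     ('social', ['people', 'society', 'community', 'family', 'education', 'health']),
--     ('technical', ['technology', 'science', 'research', 'data', 'system', 'process']),
--     ('emotional', ['love', 'hate', 'fear', 'hope', 'anger', 'joy']),
-- ]
--
--
-- def _group_semantically_similar_words(words: List[str]) -> Dict:
--     """Group words by semantic similarity, category-major: one filtering pass
--     over the input per category (the term lists are disjoint, so priority is
--     irrelevant), then a final pass collecting the unclaimed words as 'other'."""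
--     items = []
--     claimed = []
--     for name, terms in _CATEGORIES:
--         matched = [w for w in words if w in terms]
--         if matched:
--             items.append((name, matched))
--         claimed += terms
--     other = [w for w in words if w not in claimed]
--     if other:
--         items.append(('other', other))
--     return dict(items)
-- ===== Notes on version B (the rewrite author's own statement) =====
-- stated objective: alternative
-- what changed: Replaces A's word-major single pass with a per-word six-way elif chain by a category-major algorithm: one filtering pass over the input per category (valid because the term lists are disjoint), accumulating the claimed terms, then a final pass collecting unclaimed words as 'other', building the result items list directly.
import Mathlib
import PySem

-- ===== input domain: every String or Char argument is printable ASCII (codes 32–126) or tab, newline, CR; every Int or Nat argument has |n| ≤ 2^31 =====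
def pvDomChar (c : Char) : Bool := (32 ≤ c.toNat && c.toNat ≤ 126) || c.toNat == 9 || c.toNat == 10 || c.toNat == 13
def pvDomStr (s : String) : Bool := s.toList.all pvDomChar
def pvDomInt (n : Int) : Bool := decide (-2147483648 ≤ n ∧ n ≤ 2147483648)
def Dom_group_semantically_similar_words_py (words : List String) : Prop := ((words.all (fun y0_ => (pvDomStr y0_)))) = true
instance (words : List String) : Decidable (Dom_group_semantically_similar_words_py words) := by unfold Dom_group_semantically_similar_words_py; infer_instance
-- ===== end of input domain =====

-- B is category-major: one filtering pass over the input per category (the term lists are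
-- disjoint, so A's per-word elif priority is irrelevant), then the unclaimed words as 'other';
-- same cost, different decomposition (objective: alternative).

-- ===== PORT A =====
def pvPoliticalTerms : List String := ["government", "politics", "election", "vote", "policy", "law"]
def pvEconomicTerms : List String := ["economy", "money", "business", "market", "trade", "tax"]
def pvSocialTerms : List String := ["people", "society", "community", "family", "education", "health"]
def pvTechnicalTerms : List String := ["technology", "science", "research", "data", "system", "process"]
def pvEmotionalTerms : List String := ["love", "hate", "fear", "hope", "anger", "joy"]

def pvInitGroups : PySem.Dict String (List String) :=
  (((((PySem.Dict.empty.insert "political" []).insert "economic" []).insert "social" []).insert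
      "technical" []).insert "emotional" []).insert "other" []

-- one iteration of A's for-loop: the elif chain; 'groups[k].append(word)' = modify k (· ++ [word])
def pvStepA (g : PySem.Dict String (List String)) (word : String) : PySem.Dict String (List String) :=
  if pvPoliticalTerms.contains word then g.modify "political" [] (· ++ [word])
  else if pvEconomicTerms.contains word then g.modify "economic" [] (· ++ [word])
  else if pvSocialTerms.contains word then g.modify "social" [] (· ++ [word])
  else if pvTechnicalTerms.contains word then g.modify "technical" [] (· ++ [word])
  else if pvEmotionalTerms.contains word then g.modify "emotional" [] (· ++ [word])
  else g.modify "other" [] (· ++ [word])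

def group_semantically_similar_words_py (words : List String) : List (String × List String) :=
  -- 'return {k: v for k, v in groups.items() if v}': keep entries with a non-empty list
  ((words.foldl pvStepA pvInitGroups).items.filter (fun p => !p.2.isEmpty))

-- ===== PORT B =====
def pvCategories : List (String × List String) :=
  [("political", ["government", "politics", "election", "vote", "policy", "law"]),
   ("economic", ["economy", "money", "business", "market", "trade", "tax"]),
   ("social", ["people", "society", "community", "family", "education", "health"]),
   ("technical", ["technology", "science", "research", "data", "system", "process"]),
   ("emotional", ["love", "hate", "fear", "hope", "anger", "joy"])]

-- one iteration of B's for-loop over _CATEGORIES: state = (items, claimed)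
def pvStepBCat (words : List String) (st : List (String × List String) × List String)
    (p : String × List String) : List (String × List String) × List String :=
  let matched := words.filter (fun w => p.2.contains w)
  ((if matched.isEmpty then st.1 else st.1 ++ [(p.1, matched)]), st.2 ++ p.2)

def group_semantically_similar_words_py_alt (words : List String) : List (String × List String) :=
  let st := pvCategories.foldl (pvStepBCat words) ([], [])
  let other := words.filter (fun w => !st.2.contains w)
  let items := if other.isEmpty then st.1 else st.1 ++ [("other", other)]
  -- 'return dict(items)'
  (PySem.Dict.ofList items).items

-- ===== PRECONDITION & SPEC =====
def Spec_group_semantically_similar_words_py (words : List String) (out : List (String × List String)) : Prop := out = group_semantically_similar_words_py_alt words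
instance (words : List String) (out : List (String × List String)) : Decidable (Spec_group_semantically_similar_words_py words out) := by unfold Spec_group_semantically_similar_words_py; infer_instance

-- ===== CLAIM (what is proved, stated in full; the proofs are below) =====
def Claim_equal_group_semantically_similar_words_py : Prop := ∀ (words : List String), Dom_group_semantically_similar_words_py words → Spec_group_semantically_similar_words_py words (group_semantically_similar_words_py words)

-- ===== LEMMAS AND PROOFS =====

-- the category A's elif chain assigns to a word
def pvCatOf (w : String) : String :=
  if pvPoliticalTerms.contains w then "political"
  else if pvEconomicTerms.contains w then "economic"
  else if pvSocialTerms.contains w then "social"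
  else if pvTechnicalTerms.contains w then "technical"
  else if pvEmotionalTerms.contains w then "emotional"
  else "other"

-- the canonical full table: all six groups, each the subsequence of words of that category
def pvTable (ws : List String) : List (String × List String) :=
  [("political", ws.filter (fun w => pvCatOf w == "political")),
   ("economic", ws.filter (fun w => pvCatOf w == "economic")),
   ("social", ws.filter (fun w => pvCatOf w == "social")),
   ("technical", ws.filter (fun w => pvCatOf w == "technical")),
   ("emotional", ws.filter (fun w => pvCatOf w == "emotional")),
   ("other", ws.filter (fun w => pvCatOf w == "other"))]

theorem pvStepA_eq_modify (g : PySem.Dict String (List String)) (w : String) :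
    pvStepA g w = g.modify (pvCatOf w) [] (· ++ [w]) := by
  unfold pvStepA pvCatOf; split_ifs <;> rfl

theorem pvFoldA_items (ws : List String) :
    (ws.foldl pvStepA pvInitGroups).items = pvTable ws := by
  induction ws using List.reverseRecOn with
  | nil => rfl
  | append_singleton ws w ih =>
    rw [List.foldl_append, List.foldl_cons, List.foldl_nil, pvStepA_eq_modify]
    have hg : ws.foldl pvStepA pvInitGroups = ⟨pvTable ws⟩ := PySem.Dict.ext ih
    rw [hg]
    have hc : pvCatOf w = "political" ∨ pvCatOf w = "economic" ∨ pvCatOf w = "social" ∨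
        pvCatOf w = "technical" ∨ pvCatOf w = "emotional" ∨ pvCatOf w = "other" := by
      unfold pvCatOf; split_ifs <;> simp_all
    rcases hc with h | h | h | h | h | h <;>
      rw [h] <;>
      simp [PySem.Dict.modify, PySem.Dict.insert, PySem.Dict.contains_mk,
        PySem.Dict.getD_eq_get?_getD, PySem.Dict.get?_mk_cons, pvTable,
        List.filter_append, List.filter, h]
theorem pvCat_eq_pol (w : String) : pvPoliticalTerms.contains w = (pvCatOf w == "political") := by
  unfold pvCatOf
  by_cases h : pvPoliticalTerms.contains w = true
  · rw [if_pos h, h]; rfl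
  · simp only [Bool.not_eq_true] at h
    rw [if_neg (by simp only [h]; simp), h]
    split_ifs <;> simp_all

theorem pvCat_eq_eco (w : String) : pvEconomicTerms.contains w = (pvCatOf w == "economic") := by
  unfold pvCatOf
  by_cases h : pvEconomicTerms.contains w = true
  · have hp : pvPoliticalTerms.contains w = false := by
      have hm : w ∈ pvEconomicTerms := by simpa using h
      fin_cases hm <;> decide
    rw [if_neg (by simp only [hp]; simp), if_pos h, h]; rfl
  · simp only [Bool.not_eq_true] at h
    rw [h]; split_ifs <;> simp_all

theorem pvCat_eq_soc (w : String) : pvSocialTerms.contains w = (pvCatOf w == "social") := by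
  unfold pvCatOf
  by_cases h : pvSocialTerms.contains w = true
  · have hm : w ∈ pvSocialTerms := by simpa using h
    have hp : pvPoliticalTerms.contains w = false := by fin_cases hm <;> decide
    have he : pvEconomicTerms.contains w = false := by fin_cases hm <;> decide
    rw [if_neg (by simp only [hp]; simp), if_neg (by simp only [he]; simp), if_pos h, h]; rfl
  · simp only [Bool.not_eq_true] at h
    rw [h]; split_ifs <;> simp_all

theorem pvCat_eq_tec (w : String) : pvTechnicalTerms.contains w = (pvCatOf w == "technical") := by
  unfold pvCatOf
  by_cases h : pvTechnicalTerms.contains w = true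
  · have hm : w ∈ pvTechnicalTerms := by simpa using h
    have hp : pvPoliticalTerms.contains w = false := by fin_cases hm <;> decide
    have he : pvEconomicTerms.contains w = false := by fin_cases hm <;> decide
    have hs : pvSocialTerms.contains w = false := by fin_cases hm <;> decide
    rw [if_neg (by simp only [hp]; simp), if_neg (by simp only [he]; simp), if_neg (by simp only [hs]; simp), if_pos h, h]; rfl
  · simp only [Bool.not_eq_true] at h
    rw [h]; split_ifs <;> simp_all

theorem pvCat_eq_emo (w : String) : pvEmotionalTerms.contains w = (pvCatOf w == "emotional") := by
  unfold pvCatOf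
  by_cases h : pvEmotionalTerms.contains w = true
  · have hm : w ∈ pvEmotionalTerms := by simpa using h
    have hp : pvPoliticalTerms.contains w = false := by fin_cases hm <;> decide
    have he : pvEconomicTerms.contains w = false := by fin_cases hm <;> decide
    have hs : pvSocialTerms.contains w = false := by fin_cases hm <;> decide
    have ht : pvTechnicalTerms.contains w = false := by fin_cases hm <;> decide
    rw [if_neg (by simp only [hp]; simp), if_neg (by simp only [he]; simp), if_neg (by simp only [hs]; simp),
      if_neg (by simp only [ht]; simp), if_pos h, h]; rfl
  · simp only [Bool.not_eq_true] at h
    rw [h]; split_ifs <;> simp_all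

-- the claimed list accumulated by B's loop is the five term lists concatenated;
-- a word is unclaimed exactly when A's chain sends it to 'other'
theorem pvCat_eq_other (w : String) :
    (!(pvPoliticalTerms ++ pvEconomicTerms ++ pvSocialTerms ++ pvTechnicalTerms ++ pvEmotionalTerms).contains w)
      = (pvCatOf w == "other") := by
  unfold pvCatOf
  split_ifs with h1 h2 h3 h4 h5 <;> simp_all
theorem pvB_eq_filter_table (ws : List String) :
    group_semantically_similar_words_py_alt ws = (pvTable ws).filter (fun p => !p.2.isEmpty) := by
  have p1 : ∀ w : String, (["government", "politics", "election", "vote", "policy", "law"].contains w) = (pvCatOf w == "political") := pvCat_eq_pol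
  have p2 : ∀ w : String, (["economy", "money", "business", "market", "trade", "tax"].contains w) = (pvCatOf w == "economic") := pvCat_eq_eco
  have p3 : ∀ w : String, (["people", "society", "community", "family", "education", "health"].contains w) = (pvCatOf w == "social") := pvCat_eq_soc
  have p4 : ∀ w : String, (["technology", "science", "research", "data", "system", "process"].contains w) = (pvCatOf w == "technical") := pvCat_eq_tec
  have p5 : ∀ w : String, (["love", "hate", "fear", "hope", "anger", "joy"].contains w) = (pvCatOf w == "emotional") := pvCat_eq_emo
  have p6 : ∀ w : String, (!(["government", "politics", "election", "vote", "policy", "law",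
      "economy", "money", "business", "market", "trade", "tax",
      "people", "society", "community", "family", "education", "health",
      "technology", "science", "research", "data", "system", "process",
      "love", "hate", "fear", "hope", "anger", "joy"].contains w)) = (pvCatOf w == "other") := pvCat_eq_other
  unfold group_semantically_similar_words_py_alt pvCategories pvStepBCat
  simp only [List.foldl_cons, List.foldl_nil, List.nil_append, List.cons_append]
  simp only [p1, p2, p3, p4, p5, p6]
  by_cases h1 : (ws.filter (fun w => pvCatOf w == "political")).isEmpty = true <;>
  by_cases h2 : (ws.filter (fun w => pvCatOf w == "economic")).isEmpty = true <;>
  by_cases h3 : (ws.filter (fun w => pvCatOf w == "social")).isEmpty = true <;>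
  by_cases h4 : (ws.filter (fun w => pvCatOf w == "technical")).isEmpty = true <;>
  by_cases h5 : (ws.filter (fun w => pvCatOf w == "emotional")).isEmpty = true <;>
  by_cases h6 : (ws.filter (fun w => pvCatOf w == "other")).isEmpty = true <;>
    simp only [h1, h2, h3, h4, h5, h6, if_true, if_false, Bool.false_eq_true,
      pvTable, List.filter, Bool.not_true, Bool.not_false, List.nil_append, List.cons_append] <;>
    simp [PySem.Dict.ofList, PySem.Dict.update, PySem.Dict.insert, PySem.Dict.contains_mk, PySem.Dict.empty]

-- ===== VERDICT (by name: the statement is the Claim_ definition above) =====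
theorem group_semantically_similar_words_py_spec : Claim_equal_group_semantically_similar_words_py := by
  intro words _
  unfold Spec_group_semantically_similar_words_py
  rw [group_semantically_similar_words_py, pvFoldA_items, pvB_eq_filter_table]
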